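-- pv_equiv track=rewrite | github.com/JihwanRyu051/AI-Programing-HW | HW04_201724461/p5_MatchingCards/p5_MatchingCards.py | matchTheCards
-- ===== SOURCE A (Python) =====
-- def drawAcard(deck):
--     opencard = deck[-1]
--     del deck[-1]
--     return opencard
--
-- def matchTheCards(deck1, deck2):
--     match = 0
--     while True:
--         if not deck1 or not deck2:
--             break
--         card1 = drawAcard(deck1)
--         card2 = drawAcard(deck2)
--         if card1 == card2:
--             match += 1
--     return match
-- ===== SOURCE B (Python) =====
-- def matchTheCards(deck1, deck2):
--     n = min(len(deck1), len(deck2))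
--     match = sum(1 for a, b in zip(deck1[len(deck1)-n:], deck2[len(deck2)-n:]) if a == b)
--     del deck1[len(deck1)-n:]
--     del deck2[len(deck2)-n:]
--     return match
-- ===== Notes on version B (the rewrite author's own statement) =====
-- stated objective: simpler
-- what changed: Replaces the interleaved pop-and-compare while loop with a count phase (one zip over the aligned last-n elements) plus a single bulk truncation of both decks.
import Mathlib
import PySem

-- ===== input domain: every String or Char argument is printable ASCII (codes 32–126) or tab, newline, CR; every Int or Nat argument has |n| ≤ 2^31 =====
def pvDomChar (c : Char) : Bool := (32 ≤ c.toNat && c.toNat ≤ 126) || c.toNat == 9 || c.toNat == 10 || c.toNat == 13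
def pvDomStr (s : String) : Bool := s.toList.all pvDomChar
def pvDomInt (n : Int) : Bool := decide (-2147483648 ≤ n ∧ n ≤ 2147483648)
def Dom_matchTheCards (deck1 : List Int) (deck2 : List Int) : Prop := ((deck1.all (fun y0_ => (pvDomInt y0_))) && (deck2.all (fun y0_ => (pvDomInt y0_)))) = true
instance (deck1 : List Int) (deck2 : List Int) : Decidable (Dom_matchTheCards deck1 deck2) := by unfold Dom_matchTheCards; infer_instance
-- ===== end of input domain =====

-- B replaces A's interleaved pop-and-compare while loop by a single zip count over the aligned
-- suffixes plus one bulk truncation. Both Pythons mutate their arguments identically (both decks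
-- end truncated by min(len) elements); the equivalence proved here is about the RETURN value.
-- ===== PORT A =====
-- the while-True loop: draw the last card of each deck, count equal pairs, until a deck is empty
def matchLoopA (d1 : List Int) (d2 : List Int) (m : Int) : Int :=
  if h : d1 = [] ∨ d2 = [] then m
  else
    let card1 := d1.getLast (fun e => h (Or.inl e))
    let card2 := d2.getLast (fun e => h (Or.inr e))
    matchLoopA d1.dropLast d2.dropLast (if card1 = card2 then m + 1 else m)
termination_by d1.length
decreasing_by
  have h1 : d1 ≠ [] := fun e => h (Or.inl e)
  cases d1 with
  | nil => exact absurd rfl h1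
  | cons a t => simp [List.length_dropLast]

def matchTheCards (deck1 : List Int) (deck2 : List Int) : Int :=
  matchLoopA deck1 deck2 0

-- ===== PORT B =====
def matchTheCards_alt (deck1 : List Int) (deck2 : List Int) : Int :=
  let n := min deck1.length deck2.length
  ((deck1.drop (deck1.length - n)).zip (deck2.drop (deck2.length - n))).foldl
    (fun acc p => if p.1 = p.2 then acc + 1 else acc) 0

-- ===== PRECONDITION & SPEC =====
def Spec_matchTheCards (deck1 : List Int) (deck2 : List Int) (out : Int) : Prop := out = matchTheCards_alt deck1 deck2
instance (deck1 : List Int) (deck2 : List Int) (out : Int) : Decidable (Spec_matchTheCards deck1 deck2 out) := by unfold Spec_matchTheCards; infer_instance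

-- ===== CLAIM (what is proved, stated in full; the proofs are below) =====
def Claim_equal_matchTheCards : Prop := ∀ (deck1 : List Int) (deck2 : List Int), Dom_matchTheCards deck1 deck2 → Spec_matchTheCards deck1 deck2 (matchTheCards deck1 deck2)

-- ===== LEMMAS AND PROOFS =====

-- count of matching pairs: the common yardstick of both sides
def cnt (l : List (Int × Int)) : Int :=
  ((l.filter (fun p => p.1 == p.2)).length : Int)

theorem cnt_nil : cnt [] = 0 := rfl

theorem cnt_cons (p : Int × Int) (l : List (Int × Int)) :
    cnt (p :: l) = (if p.1 = p.2 then 1 else 0) + cnt l := by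
  by_cases h : p.1 = p.2
  · simp [cnt, h]; ring
  · simp [cnt, h]

theorem cnt_reverse (l : List (Int × Int)) : cnt l.reverse = cnt l := by
  simp [cnt]

theorem foldl_cnt (l : List (Int × Int)) (m : Int) :
    l.foldl (fun acc p => if p.1 = p.2 then acc + 1 else acc) m = m + cnt l := by
  induction l generalizing m with
  | nil => simp [cnt_nil]
  | cons p t ih => simp only [List.foldl_cons, ih, cnt_cons]; split_ifs <;> ring

theorem zip_reverse_eq (l1 l2 : List Int) (h : l1.length = l2.length) :
    l1.reverse.zip l2.reverse = (l1.zip l2).reverse := by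
  induction l1 generalizing l2 with
  | nil => cases l2 with | nil => rfl | cons b t2 => simp at h
  | cons a t1 ih =>
    cases l2 with
    | nil => simp at h
    | cons b t2 =>
      simp only [List.length_cons, Nat.add_right_cancel_iff] at h
      simp only [List.reverse_cons, List.zip_cons_cons]
      rw [List.zip_append (by simpa using h), ih t2 h]
      simp

theorem matchLoopA_eq (l1 l2 : List Int) (m : Int) :
    matchLoopA l1.reverse l2.reverse m = m + cnt (l1.zip l2) := by
  induction l1 generalizing l2 m with
  | nil => rw [matchLoopA]; simp [cnt_nil]
  | cons a t1 ih =>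
    cases l2 with
    | nil => rw [matchLoopA]; simp [cnt_nil]
    | cons b t2 =>
      rw [matchLoopA]
      have h1 : (a :: t1).reverse ≠ [] := by simp
      have h2 : (b :: t2).reverse ≠ [] := by simp
      have hne : ¬((a :: t1).reverse = [] ∨ (b :: t2).reverse = []) := by
        intro hc; rcases hc with hc | hc
        · exact h1 hc
        · exact h2 hc
      simp only [dif_neg hne]
      have g1 : (a :: t1).reverse.getLast (fun e => hne (Or.inl e)) = a := by
        simp [List.reverse_cons]
      have g2 : (b :: t2).reverse.getLast (fun e => hne (Or.inr e)) = b := by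
        simp [List.reverse_cons]
      have d1 : (a :: t1).reverse.dropLast = t1.reverse := by
        simp [List.reverse_cons]
      have d2 : (b :: t2).reverse.dropLast = t2.reverse := by
        simp [List.reverse_cons]
      rw [g1, g2, d1, d2, ih t2]
      rw [List.zip_cons_cons, cnt_cons]
      split_ifs <;> ring

theorem cnt_rev_zip (l1 l2 : List Int) :
    cnt (l1.reverse.zip l2.reverse) =
      cnt ((l1.drop (l1.length - min l1.length l2.length)).zip
           (l2.drop (l2.length - min l1.length l2.length))) := by
  have hs1 : l1.reverse = (l1.drop (l1.length - min l1.length l2.length)).reverse ++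
      (l1.take (l1.length - min l1.length l2.length)).reverse := by
    rw [← List.reverse_append, List.take_append_drop]
  have hs2 : l2.reverse = (l2.drop (l2.length - min l1.length l2.length)).reverse ++
      (l2.take (l2.length - min l1.length l2.length)).reverse := by
    rw [← List.reverse_append, List.take_append_drop]
  have hlen1 : (l1.drop (l1.length - min l1.length l2.length)).length = min l1.length l2.length := by
    simp [List.length_drop]; omega
  have hlen2 : (l2.drop (l2.length - min l1.length l2.length)).length = min l1.length l2.length := by
    simp [List.length_drop]; omega
  have htail : ((l1.take (l1.length - min l1.length l2.length)).reverse.zip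
      (l2.take (l2.length - min l1.length l2.length)).reverse) = [] := by
    rcases Nat.le_total l1.length l2.length with h | h
    · have hz : l1.length - min l1.length l2.length = 0 := by omega
      simp [hz]
    · have hz : l2.length - min l1.length l2.length = 0 := by omega
      simp [hz]
  rw [hs1, hs2, List.zip_append (by simp [hlen1, hlen2]), htail, List.append_nil]
  rw [zip_reverse_eq _ _ (by rw [hlen1, hlen2]), cnt_reverse]

-- ===== VERDICT (by name: the statement is the Claim_ definition above) =====
theorem matchTheCards_spec : Claim_equal_matchTheCards := by
  intro deck1 deck2 _
  unfold Spec_matchTheCards matchTheCards matchTheCards_alt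
  rw [foldl_cnt]
  have h := matchLoopA_eq deck1.reverse deck2.reverse 0
  simp only [List.reverse_reverse] at h
  rw [h, ← cnt_rev_zip]
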